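-- pv_equiv track=rewrite | github.com/GuillaumeBarree/image_segmentation | src/image_segmentation/models/tf_unet/utils.py | image_size_end_expens
-- ===== SOURCE A (Python) =====
-- def image_size_end_expens(img_size, id_pool, num_pooling, num_layers_before, kernel_size, padding):
--     if id_pool < num_pooling:
--         end_upconv_size = 2*img_size
--
--         if padding == 'valid':
--             next_img_size = end_upconv_size - (int((kernel_size-1)/2)*2*num_layers_before)
--         elif padding == 'same':
--             next_img_size = end_upconv_size
--
--         return image_size_end_expens(
--             next_img_size,
--             id_pool=id_pool+1,
--             num_pooling=num_pooling,
--             num_layers_before=num_layers_before,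
--             kernel_size=kernel_size,
--             padding=padding,
--         )
--     else:
--         return img_size
-- ===== SOURCE B (Python) =====
-- def image_size_end_expens(img_size, id_pool, num_pooling, num_layers_before, kernel_size, padding):
--     n = num_pooling - id_pool
--     if n <= 0:
--         return img_size
--     grow = 2 ** n
--     if padding == 'valid':
--         shrink = int((kernel_size - 1) / 2) * 2 * num_layers_before
--         return grow * img_size - shrink * (grow - 1)
--     elif padding == 'same':
--         return grow * img_size
--     raise ValueError("padding must be 'valid' or 'same'")
-- ===== Notes on version B (the rewrite author's own statement) =====
-- stated objective: faster
-- what changed: Replaces the O(n) recursion (n = num_pooling - id_pool) by the closed-form solution of the affine recurrence x -> 2x - c: result = 2^n*img_size - c*(2^n - 1).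
-- outside the precondition, e.g. on image_size_end_expens(0, 0, 950, 1, 3, 'same'): A returns 0, B returns 0
import Mathlib
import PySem

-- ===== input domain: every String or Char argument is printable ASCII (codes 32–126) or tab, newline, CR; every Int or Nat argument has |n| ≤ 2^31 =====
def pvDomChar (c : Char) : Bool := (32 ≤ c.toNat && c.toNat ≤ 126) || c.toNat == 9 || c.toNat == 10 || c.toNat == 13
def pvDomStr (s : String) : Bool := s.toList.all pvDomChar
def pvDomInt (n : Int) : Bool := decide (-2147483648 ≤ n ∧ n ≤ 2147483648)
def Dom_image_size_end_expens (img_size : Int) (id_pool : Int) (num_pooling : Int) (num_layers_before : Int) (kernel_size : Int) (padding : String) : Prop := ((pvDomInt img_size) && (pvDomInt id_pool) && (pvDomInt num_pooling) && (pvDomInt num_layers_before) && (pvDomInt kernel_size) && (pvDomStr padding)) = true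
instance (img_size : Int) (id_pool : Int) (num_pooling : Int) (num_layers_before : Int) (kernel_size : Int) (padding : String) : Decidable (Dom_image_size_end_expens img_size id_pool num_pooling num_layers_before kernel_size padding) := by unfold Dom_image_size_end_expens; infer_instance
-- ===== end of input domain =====

-- ===== PORT A =====
-- B replaces the O(n) recursion (n = num_pooling - id_pool) by the closed-form solution of the
-- affine recurrence x -> 2x - c (objective: faster, asymptotic).
-- Python's int((kernel_size-1)/2) is exact float halving then truncation toward zero; on the stated
-- domain (|kernel_size| <= 2^31) this equals Lean's Int.tdiv (truncated division), used below.
def image_size_end_expens (img_size : Int) (id_pool : Int) (num_pooling : Int) (num_layers_before : Int) (kernel_size : Int) (padding : String) : Int :=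
  if id_pool < num_pooling then
    let end_upconv_size := 2 * img_size
    let next_img_size :=
      if padding = "valid" then
        end_upconv_size - ((kernel_size - 1).tdiv 2 * 2 * num_layers_before)
      else
        -- padding = "same" assigns end_upconv_size; any other padding raises
        -- UnboundLocalError in Python and is excluded by Pre_
        end_upconv_size
    image_size_end_expens next_img_size (id_pool + 1) num_pooling num_layers_before kernel_size padding
  else
    img_size
termination_by (num_pooling - id_pool).toNat
decreasing_by omega

-- ===== PORT B =====
def image_size_end_expens_alt (img_size : Int) (id_pool : Int) (num_pooling : Int) (num_layers_before : Int) (kernel_size : Int) (padding : String) : Int :=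
  let n := num_pooling - id_pool
  if n ≤ 0 then
    img_size
  else
    let grow : Int := 2 ^ n.toNat
    if padding = "valid" then
      let shrink := (kernel_size - 1).tdiv 2 * 2 * num_layers_before
      grow * img_size - shrink * (grow - 1)
    else if padding = "same" then
      grow * img_size
    else
      img_size  -- Source B raises ValueError here; these inputs are excluded by Pre_

-- ===== PRECONDITION & SPEC =====
-- Pre_ admits exactly the inputs where Python A returns: when at least one recursive step runs,
-- padding must be 'valid' or 'same' (otherwise UnboundLocalError), and the recursion depth
-- num_pooling - id_pool must stay below CPython's recursion limit (~997 here; we use the safe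
-- bound 900, otherwise RecursionError).
def Pre_image_size_end_expens (img_size : Int) (id_pool : Int) (num_pooling : Int) (num_layers_before : Int) (kernel_size : Int) (padding : String) : Prop :=
  num_pooling ≤ id_pool ∨
    (num_pooling - id_pool ≤ 900 ∧ (padding = "valid" ∨ padding = "same"))
instance (img_size : Int) (id_pool : Int) (num_pooling : Int) (num_layers_before : Int) (kernel_size : Int) (padding : String) : Decidable (Pre_image_size_end_expens img_size id_pool num_pooling num_layers_before kernel_size padding) := by unfold Pre_image_size_end_expens; infer_instance

def pvWitness_image_size_end_expens : Int × Int × Int × Int × Int × String := (5, 0, 3, 2, 3, "valid")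

def Spec_image_size_end_expens (img_size : Int) (id_pool : Int) (num_pooling : Int) (num_layers_before : Int) (kernel_size : Int) (padding : String) (out : Int) : Prop := out = image_size_end_expens_alt img_size id_pool num_pooling num_layers_before kernel_size padding
instance (img_size : Int) (id_pool : Int) (num_pooling : Int) (num_layers_before : Int) (kernel_size : Int) (padding : String) (out : Int) : Decidable (Spec_image_size_end_expens img_size id_pool num_pooling num_layers_before kernel_size padding out) := by unfold Spec_image_size_end_expens; infer_instance

-- ===== CLAIM (what is proved, stated in full; the proofs are below) =====
def Claim_equal_image_size_end_expens : Prop := ∀ (img_size : Int) (id_pool : Int) (num_pooling : Int) (num_layers_before : Int) (kernel_size : Int) (padding : String), Dom_image_size_end_expens img_size id_pool num_pooling num_layers_before kernel_size padding → Pre_image_size_end_expens img_size id_pool num_pooling num_layers_before kernel_size padding → Spec_image_size_end_expens img_size id_pool num_pooling num_layers_before kernel_size padding (image_size_end_expens img_size id_pool num_pooling num_layers_before kernel_size padding)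

-- ===== LEMMAS AND PROOFS =====

-- The recursion computes the closed form 2^n * img - c * (2^n - 1), c depending on padding.
theorem image_size_end_expens_closed (n : Nat) :
    ∀ (img_size id_pool num_pooling num_layers_before kernel_size : Int) (padding : String),
    (num_pooling - id_pool).toNat = n →
    (padding = "valid" ∨ padding = "same") →
    image_size_end_expens img_size id_pool num_pooling num_layers_before kernel_size padding =
      2 ^ n * img_size -
        (if padding = "valid" then (kernel_size - 1).tdiv 2 * 2 * num_layers_before else 0) *
          (2 ^ n - 1) := by
  induction n with
  | zero =>
    intro img id np nl k pad h _
    rw [image_size_end_expens]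
    have : ¬ id < np := by omega
    simp [this]
  | succ n ih =>
    intro img id np nl k pad h hpad
    have hlt : id < np := by omega
    rw [image_size_end_expens]
    simp only [hlt, if_true]
    have h' : (np - (id + 1)).toNat = n := by omega
    rcases hpad with hv | hs
    · rw [ih _ _ _ _ _ _ h' (Or.inl hv)]
      simp [hv]
      ring
    · by_cases hvv : pad = "valid"
      · rw [hvv] at hs; exact absurd hs (by decide)
      · rw [ih _ _ _ _ _ _ h' (Or.inr hs)]
        simp [hvv]
        ring

-- ===== VERDICT (by name: the statement is the Claim_ definition above) =====
theorem image_size_end_expens_spec : Claim_equal_image_size_end_expens := by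
  intro img id np nl k pad _ hpre
  unfold Spec_image_size_end_expens image_size_end_expens_alt
  rcases hpre with hle | ⟨_, hpad⟩
  · rw [image_size_end_expens]
    have h1 : ¬ id < np := by omega
    have h2 : np - id ≤ 0 := by omega
    simp [h1, h2]
  · by_cases hle : np ≤ id
    · rw [image_size_end_expens]
      have h1 : ¬ id < np := by omega
      have h2 : np - id ≤ 0 := by omega
      simp [h1, h2]
    · have hn : ¬ np - id ≤ 0 := by omega
      rw [image_size_end_expens_closed (np - id).toNat img id np nl k pad rfl hpad]
      simp only [hn, if_false]
      rcases hpad with hv | hs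
      · simp [hv]
      · simp [hs]
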